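-- pv_equiv track=rewrite | github.com/mattsoh/AOC2024 | 8.py | calc
-- ===== SOURCE A (Python) =====
-- from math import gcd
--
-- def calc(a1, a2, width, height):
--     x1, y1 = a1
--     x2, y2 = a2
--     points = set()
--     dx, dy = x2 - x1, y2 - y1
--     gcd_val = gcd(dx, dy)
--     dx //= gcd_val
--     dy //= gcd_val
--
--     x, y = x1 + dx, y1 + dy
--     while (x, y) != (x2, y2):
--         points.add((x, y))
--         x += dx
--         y += dy
--
--     for direction in (-1, 1):
--         nx, ny = x1 + direction * dx, y1 + direction * dy
--         while 0 <= nx < width and 0 <= ny < height: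
--             points.add((nx, ny))
--             nx += direction * dx
--             ny += direction * dy
--
--     return points
-- ===== SOURCE B (Python) =====
-- from math import gcd
--
-- def _axis(c, d, bound):
--     # integer k-interval (lo, hi) of solutions of 0 <= c + k*d < bound, for d != 0
--     if d > 0:
--         return (-(c // d), (bound - 1 - c) // d)
--     return (-((bound - 1 - c) // (-d)), c // (-d))
--
-- def calc(a1, a2, width, height):
--     x1, y1 = a1
--     x2, y2 = a2
--     dx, dy = x2 - x1, y2 - y1
--     g = gcd(dx, dy)
--     dx //= g
--     dy //= g
--     if dx == 0:
--         lo, hi = _axis(y1, dy, height)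
--         if not (0 <= x1 < width):
--             lo, hi = 0, -1
--     elif dy == 0:
--         lo, hi = _axis(x1, dx, width)
--         if not (0 <= y1 < height):
--             lo, hi = 0, -1
--     else:
--         lx, hx = _axis(x1, dx, width)
--         ly, hy = _axis(y1, dy, height)
--         lo, hi = max(lx, ly), min(hx, hy)
--     pts = [(x1 + k * dx, y1 + k * dy) for k in range(1, g)]
--     if lo <= -1 <= hi:
--         pts += [(x1 + k * dx, y1 + k * dy) for k in range(-1, lo - 1, -1)]
--     if lo <= 1 and g <= hi:
--         pts += [(x1 + k * dx, y1 + k * dy) for k in range(g, hi + 1)]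
--     return set(pts)
-- ===== Notes on version B (the rewrite author's own statement) =====
-- stated objective: alternative
-- what changed: A marches point by point in both directions with while-loops and a dedup set; B computes the in-bounds step-interval [lo,hi] in closed form by floor-division per axis, intersects the two axis intervals, and emits the interior and bounded ranges directly.
import Mathlib
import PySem

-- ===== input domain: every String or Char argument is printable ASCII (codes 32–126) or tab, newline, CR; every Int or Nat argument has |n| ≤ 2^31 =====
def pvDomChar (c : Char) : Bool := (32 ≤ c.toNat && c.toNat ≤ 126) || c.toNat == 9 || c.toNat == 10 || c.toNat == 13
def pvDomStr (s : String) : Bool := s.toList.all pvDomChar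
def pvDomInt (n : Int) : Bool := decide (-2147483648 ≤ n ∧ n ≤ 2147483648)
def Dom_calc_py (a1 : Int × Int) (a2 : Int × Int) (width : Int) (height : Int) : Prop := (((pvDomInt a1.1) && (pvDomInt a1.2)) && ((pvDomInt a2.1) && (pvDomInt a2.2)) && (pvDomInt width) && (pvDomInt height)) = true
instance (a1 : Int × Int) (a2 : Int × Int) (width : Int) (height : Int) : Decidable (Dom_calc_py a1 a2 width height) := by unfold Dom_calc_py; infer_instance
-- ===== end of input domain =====

-- B replaces A's three point-by-point marches by closed-form integer k-interval bounds
-- (floor-division) intersected across the two axes (objective: alternative algorithm).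

-- ===== PORT A =====
-- while (x, y) != (x2, y2): … ported as fuel-bounded recursion; fuel gcd(dx0, dy0) is
-- enough on every input admitted by Pre_ (the loop runs exactly gcd-1 iterations there).
def pvLoop1 (x2 y2 dx dy : Int) : Nat → Int → Int → PySem.Set (Int × Int) → PySem.Set (Int × Int)
  | 0, _, _, pts => pts
  | fuel + 1, x, y, pts =>
      if (x, y) ≠ (x2, y2) then
        pvLoop1 x2 y2 dx dy fuel (x + dx) (y + dy) (PySem.Set.add pts (x, y))
      else pts

-- while 0 <= nx < width and 0 <= ny < height: … ported as fuel-bounded recursion; fuel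
-- |width|+|height|+2 is enough on every input admitted by Pre_ (the step is nonzero).
def pvMarch (width height sdx sdy : Int) : Nat → Int → Int → PySem.Set (Int × Int) → PySem.Set (Int × Int)
  | 0, _, _, pts => pts
  | fuel + 1, nx, ny, pts =>
      if 0 ≤ nx ∧ nx < width ∧ 0 ≤ ny ∧ ny < height then
        pvMarch width height sdx sdy fuel (nx + sdx) (ny + sdy) (PySem.Set.add pts (nx, ny))
      else pts

def calc_py (a1 : Int × Int) (a2 : Int × Int) (width : Int) (height : Int) : List (Int × Int) :=
  let x1 := a1.1; let y1 := a1.2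
  let x2 := a2.1; let y2 := a2.2
  let dx0 := x2 - x1; let dy0 := y2 - y1
  let gcd_val : Int := (Int.gcd dx0 dy0 : Nat)
  let dx := PySem.Int.floordiv dx0 gcd_val
  let dy := PySem.Int.floordiv dy0 gcd_val
  let s1 := pvLoop1 x2 y2 dx dy (Int.gcd dx0 dy0) (x1 + dx) (y1 + dy) PySem.Set.empty
  -- for direction in (-1, 1): … unrolled into the two marches
  let s2 := pvMarch width height ((-1) * dx) ((-1) * dy) (width.natAbs + height.natAbs + 2) (x1 + (-1) * dx) (y1 + (-1) * dy) s1
  pvMarch width height (1 * dx) (1 * dy) (width.natAbs + height.natAbs + 2) (x1 + 1 * dx) (y1 + 1 * dy) s2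

-- ===== PORT B =====
-- integer k-interval (lo, hi) of solutions of 0 <= c + k*d < bound, for d != 0
def pvAxis (c d bound : Int) : Int × Int :=
  if d > 0 then (-(PySem.Int.floordiv c d), PySem.Int.floordiv (bound - 1 - c) d)
  else (-(PySem.Int.floordiv (bound - 1 - c) (-d)), PySem.Int.floordiv c (-d))

def calc_py_alt (a1 : Int × Int) (a2 : Int × Int) (width : Int) (height : Int) : List (Int × Int) :=
  let x1 := a1.1; let y1 := a1.2
  let x2 := a2.1; let y2 := a2.2
  let dx0 := x2 - x1; let dy0 := y2 - y1
  let g : Int := (Int.gcd dx0 dy0 : Nat)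
  let dx := PySem.Int.floordiv dx0 g
  let dy := PySem.Int.floordiv dy0 g
  let lh : Int × Int :=
    if dx = 0 then (if 0 ≤ x1 ∧ x1 < width then pvAxis y1 dy height else (0, -1))
    else if dy = 0 then (if 0 ≤ y1 ∧ y1 < height then pvAxis x1 dx width else (0, -1))
    else
      let px := pvAxis x1 dx width
      let py := pvAxis y1 dy height
      (max px.1 py.1, min px.2 py.2)
  let lo := lh.1; let hi := lh.2
  let pts := (PySem.List.pyRange 1 g 1).map (fun k => (x1 + k * dx, y1 + k * dy))
  let pts := if lo ≤ -1 ∧ -1 ≤ hi then pts ++ (PySem.List.pyRange (-1) (lo - 1) (-1)).map (fun k => (x1 + k * dx, y1 + k * dy)) else pts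
  let pts := if lo ≤ 1 ∧ g ≤ hi then pts ++ (PySem.List.pyRange g (hi + 1) 1).map (fun k => (x1 + k * dx, y1 + k * dy)) else pts
  PySem.Set.ofList pts

-- ===== PRECONDITION & SPEC =====
-- Pre_ excludes exactly a1 = a2, where gcd(0,0) = 0 and 'dx //= gcd_val' raises
-- ZeroDivisionError in A (B computes the same gcd and raises there too).
def Pre_calc_py (a1 : Int × Int) (a2 : Int × Int) (width : Int) (height : Int) : Prop := a1 ≠ a2
instance (a1 : Int × Int) (a2 : Int × Int) (width : Int) (height : Int) : Decidable (Pre_calc_py a1 a2 width height) := by unfold Pre_calc_py; infer_instance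
def pvWitness_calc_py : (Int × Int) × (Int × Int) × Int × Int := ((0, 0), (2, 2), 4, 4)

def Spec_calc_py (a1 : Int × Int) (a2 : Int × Int) (width : Int) (height : Int) (out : List (Int × Int)) : Prop := out = calc_py_alt a1 a2 width height
instance (a1 : Int × Int) (a2 : Int × Int) (width : Int) (height : Int) (out : List (Int × Int)) : Decidable (Spec_calc_py a1 a2 width height out) := by unfold Spec_calc_py; infer_instance

-- ===== CLAIM (what is proved, stated in full; the proofs are below) =====
def Claim_equal_calc_py : Prop := ∀ (a1 : Int × Int) (a2 : Int × Int) (width : Int) (height : Int), Dom_calc_py a1 a2 width height → Pre_calc_py a1 a2 width height → Spec_calc_py a1 a2 width height (calc_py a1 a2 width height)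

-- ===== LEMMAS AND PROOFS =====

theorem pv_axis_iff (c d b k : Int) (hd : d ≠ 0) :
    (0 ≤ c + k * d ∧ c + k * d < b) ↔ ((pvAxis c d b).1 ≤ k ∧ k ≤ (pvAxis c d b).2) := by
  unfold pvAxis
  split_ifs with hpos
  · simp only
    rw [neg_le, PySem.Int.le_floordiv_iff_mul_le hpos]
    constructor
    · rintro ⟨h1, h2⟩
      exact ⟨by nlinarith, (PySem.Int.le_floordiv_iff_mul_le hpos).mpr (by nlinarith)⟩
    · rintro ⟨h1, h2⟩
      have h3 := (PySem.Int.le_floordiv_iff_mul_le hpos).mp h2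
      constructor <;> nlinarith
  · have hneg : 0 < -d := by omega
    simp only
    rw [neg_le, PySem.Int.le_floordiv_iff_mul_le hneg]
    constructor
    · rintro ⟨h1, h2⟩
      exact ⟨by nlinarith, (PySem.Int.le_floordiv_iff_mul_le hneg).mpr (by nlinarith)⟩
    · rintro ⟨h1, h2⟩
      have h3 := (PySem.Int.le_floordiv_iff_mul_le hneg).mp h2
      constructor <;> nlinarith

theorem pv_pt_inj (x1 y1 dx dy : Int) (hd : ¬(dx = 0 ∧ dy = 0)) :
    Function.Injective (fun k : Int => (x1 + k * dx, y1 + k * dy)) := by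
  intro j k hjk
  simp only [Prod.mk.injEq] at hjk
  obtain ⟨hx, hy⟩ := hjk
  have hx' : j * dx = k * dx := by linarith
  have hy' : j * dy = k * dy := by linarith
  rcases not_and_or.mp hd with h | h
  · exact mul_right_cancel₀ h hx'
  · exact mul_right_cancel₀ h hy'

theorem pv_march_stop (w h dx dy x1 y1 lo hi : Int)
    (hib : ∀ k : Int, (0 ≤ x1 + k * dx ∧ x1 + k * dx < w ∧ 0 ≤ y1 + k * dy ∧ y1 + k * dy < h) ↔ (lo ≤ k ∧ k ≤ hi))
    (k0 : Int) (hk : ¬(lo ≤ k0 ∧ k0 ≤ hi)) (fuel : Nat) (hf : 0 < fuel) (s : PySem.Set (Int × Int)) :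
    pvMarch w h dx dy fuel (x1 + k0 * dx) (y1 + k0 * dy) s = s := by
  cases fuel with
  | zero => omega
  | succ n =>
    simp only [pvMarch]
    rw [if_neg]
    intro hc
    exact hk ((hib k0).mp hc)

theorem pv_march_eq (w h dx dy x1 y1 lo hi : Int)
    (hib : ∀ k : Int, (0 ≤ x1 + k * dx ∧ x1 + k * dx < w ∧ 0 ≤ y1 + k * dy ∧ y1 + k * dy < h) ↔ (lo ≤ k ∧ k ≤ hi)) :
    ∀ (fuel : Nat) (k0 : Int) (s : PySem.Set (Int × Int)),
      (hi + 1 - k0).toNat < fuel → lo ≤ k0 →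
      pvMarch w h dx dy fuel (x1 + k0 * dx) (y1 + k0 * dy) s
        = (PySem.List.pyRange k0 (hi + 1) 1).foldl (fun t k => PySem.Set.add t (x1 + k * dx, y1 + k * dy)) s := by
  intro fuel
  induction fuel with
  | zero => intro k0 s hf _; omega
  | succ n ih =>
    intro k0 s hf hlo
    by_cases hk : k0 ≤ hi
    · have hc := (hib k0).mpr ⟨hlo, hk⟩
      simp only [pvMarch]
      rw [if_pos hc, PySem.List.pyRange_one_cons (by omega)]
      simp only [List.foldl_cons]
      have e1 : x1 + k0 * dx + dx = x1 + (k0 + 1) * dx := by ring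
      have e2 : y1 + k0 * dy + dy = y1 + (k0 + 1) * dy := by ring
      rw [e1, e2]
      exact ih (k0 + 1) _ (by omega) (by omega)
    · rw [pv_march_stop w h dx dy x1 y1 lo hi hib k0 (by omega) _ (by omega) s,
          PySem.List.pyRange_one_eq_nil (by omega)]
      rfl

theorem pv_loop1_eq (x1 y1 dx dy g : Int) (hd : ¬(dx = 0 ∧ dy = 0)) (hg : 1 ≤ g) :
    ∀ (fuel : Nat) (k : Int) (s : PySem.Set (Int × Int)), 1 ≤ k → k ≤ g → (g - k).toNat ≤ fuel →
      pvLoop1 (x1 + g * dx) (y1 + g * dy) dx dy fuel (x1 + k * dx) (y1 + k * dy) s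
        = (PySem.List.pyRange k g 1).foldl (fun t k => PySem.Set.add t (x1 + k * dx, y1 + k * dy)) s := by
  intro fuel
  induction fuel with
  | zero =>
    intro k s h1 h2 h3
    have : k = g := by omega
    subst this
    rw [PySem.List.pyRange_one_eq_nil (by omega)]
    rfl
  | succ n ih =>
    intro k s h1 h2 h3
    by_cases hkg : k = g
    · subst hkg
      simp only [pvLoop1]
      rw [if_neg (by simp), PySem.List.pyRange_one_eq_nil (by omega)]
      rfl
    · have hlt : k < g := lt_of_le_of_ne h2 hkg
      simp only [pvLoop1]
      rw [if_pos, PySem.List.pyRange_one_cons (by omega)]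
      · simp only [List.foldl_cons]
        have e1 : x1 + k * dx + dx = x1 + (k + 1) * dx := by ring
        have e2 : y1 + k * dy + dy = y1 + (k + 1) * dy := by ring
        rw [e1, e2]
        exact ih (k + 1) _ (by omega) (by omega) (by omega)
      · intro hc
        exact hkg (pv_pt_inj x1 y1 dx dy hd hc)

theorem pv_foldl_add_disj {α : Type} [BEq α] [LawfulBEq α] (f : Int → α)
    (ks : List Int) (s : PySem.Set α) (h1 : (ks.map f).Nodup) (h2 : ∀ x ∈ ks.map f, x ∉ s) :
    ks.foldl (fun t k => PySem.Set.add t (f k)) s = s ++ ks.map f := by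
  rw [← PySem.Set.update_map_eq_foldl_add, PySem.Set.update_eq_append_of_disjoint _ _ h1 h2]

theorem pv_foldl_add_sub {α : Type} [BEq α] [LawfulBEq α] (f : Int → α)
    (ks : List Int) (s : PySem.Set α) (h : ∀ x ∈ ks.map f, x ∈ s) :
    ks.foldl (fun t k => PySem.Set.add t (f k)) s = s := by
  rw [← PySem.Set.update_map_eq_foldl_add, PySem.Set.update_eq_append_filter]
  have he : (PySem.Set.ofList (ks.map f)).filter (fun y => !(PySem.Set.contains s y)) = [] := by
    rw [List.filter_eq_nil_iff]
    intro a ha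
    have ham : a ∈ ks.map f := (PySem.Set.mem_ofList _ _).mp ha
    simp
    exact h a ham
  rw [he, List.append_nil]

theorem pv_axis_len (c d b lo hi : Int) (hd : d ≠ 0)
    (h1 : 0 ≤ c + lo * d ∧ c + lo * d < b) (h2 : 0 ≤ c + hi * d ∧ c + hi * d < b)
    (hle : lo ≤ hi) : hi - lo < b := by
  rcases lt_or_gt_of_ne hd with hneg | hpos
  · nlinarith
  · nlinarith

theorem pv_nodup_pyRange_neg (a b : Int) : (PySem.List.pyRange a b (-1)).Nodup := by
  rw [PySem.List.pyRange_neg_one]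
  apply List.Nodup.map
  · intro i j hij
    simp only at hij
    omega
  · exact List.nodup_range

theorem pv_ne_of_disj {α : Type} {l1 l2 : List α} (h : ∀ x ∈ l2, x ∉ l1) :
    ∀ a ∈ l1, ∀ b ∈ l2, a ≠ b :=
  fun _ ha b hb heq => absurd (heq ▸ ha) (h b hb)

theorem pv_main_eq (x1 y1 dx dy g w h lo hi : Int) (fuel1 : Nat)
    (hg : 1 ≤ g) (hd : ¬(dx = 0 ∧ dy = 0)) (hfuel1 : (g - 1).toNat ≤ fuel1)
    (hib : ∀ k : Int, (0 ≤ x1 + k * dx ∧ x1 + k * dx < w ∧ 0 ≤ y1 + k * dy ∧ y1 + k * dy < h) ↔ (lo ≤ k ∧ k ≤ hi)) :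
    pvMarch w h (1 * dx) (1 * dy) (w.natAbs + h.natAbs + 2) (x1 + 1 * dx) (y1 + 1 * dy)
      (pvMarch w h ((-1) * dx) ((-1) * dy) (w.natAbs + h.natAbs + 2) (x1 + (-1) * dx) (y1 + (-1) * dy)
        (pvLoop1 (x1 + g * dx) (y1 + g * dy) dx dy fuel1 (x1 + dx) (y1 + dy) PySem.Set.empty))
    = PySem.Set.ofList
        (if lo ≤ 1 ∧ g ≤ hi then
           (if lo ≤ -1 ∧ -1 ≤ hi then
              (PySem.List.pyRange 1 g 1).map (fun k => (x1 + k * dx, y1 + k * dy))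
                ++ (PySem.List.pyRange (-1) (lo - 1) (-1)).map (fun k => (x1 + k * dx, y1 + k * dy))
            else (PySem.List.pyRange 1 g 1).map (fun k => (x1 + k * dx, y1 + k * dy)))
             ++ (PySem.List.pyRange g (hi + 1) 1).map (fun k => (x1 + k * dx, y1 + k * dy))
         else
           (if lo ≤ -1 ∧ -1 ≤ hi then
              (PySem.List.pyRange 1 g 1).map (fun k => (x1 + k * dx, y1 + k * dy))
                ++ (PySem.List.pyRange (-1) (lo - 1) (-1)).map (fun k => (x1 + k * dx, y1 + k * dy))
            else (PySem.List.pyRange 1 g 1).map (fun k => (x1 + k * dx, y1 + k * dy)))) := by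
  have hinj := pv_pt_inj x1 y1 dx dy hd
  set pt := fun k : Int => (x1 + k * dx, y1 + k * dy) with hptdef
  set I0 := (PySem.List.pyRange 1 g 1).map pt with hI0
  set B0 := (PySem.List.pyRange (-1) (lo - 1) (-1)).map pt with hB0
  set F0 := (PySem.List.pyRange g (hi + 1) 1).map pt with hF0
  -- interval length bound (for fuel sufficiency)
  have hlen : lo ≤ hi → hi - lo < (w.natAbs : Int) + (h.natAbs : Int) := by
    intro hlh
    have h1 := (hib lo).mpr ⟨le_refl lo, hlh⟩
    have h2 := (hib hi).mpr ⟨hlh, le_refl hi⟩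
    rcases not_and_or.mp hd with hdx | hdy
    · have := pv_axis_len x1 dx w lo hi hdx ⟨h1.1, h1.2.1⟩ ⟨h2.1, h2.2.1⟩ hlh
      omega
    · have := pv_axis_len y1 dy h lo hi hdy ⟨h1.2.2.1, h1.2.2.2⟩ ⟨h2.2.2.1, h2.2.2.2⟩ hlh
      omega
  -- membership shapes
  have hmemI : ∀ p, p ∈ I0 ↔ ∃ k, (1 ≤ k ∧ k < g) ∧ pt k = p := by
    intro p
    simp [hI0, List.mem_map, PySem.List.mem_pyRange_one]
  have hmemB : ∀ p, p ∈ B0 ↔ ∃ k, (lo - 1 < k ∧ k ≤ -1) ∧ pt k = p := by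
    intro p
    simp [hB0, List.mem_map, PySem.List.mem_pyRange_neg_one]
  have hnodupI : I0.Nodup := (PySem.List.nodup_pyRange_one 1 g).map hinj
  have hnodupB : B0.Nodup := (pv_nodup_pyRange_neg (-1) (lo - 1)).map hinj
  have hnodupF : F0.Nodup := (PySem.List.nodup_pyRange_one g (hi + 1)).map hinj
  have hdisjBI : ∀ x ∈ B0, x ∉ I0 := by
    intro x hx hx'
    obtain ⟨k, hk, rfl⟩ := (hmemB x).mp hx
    obtain ⟨j, hj, hjk⟩ := (hmemI (pt k)).mp hx'
    have := hinj hjk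
    omega
  have hnodupIB : (I0 ++ B0).Nodup := by
    rw [List.nodup_append]
    exact ⟨hnodupI, hnodupB, pv_ne_of_disj hdisjBI⟩
  -- step 1: the interior loop
  rw [show x1 + dx = x1 + 1 * dx from by ring, show y1 + dy = y1 + 1 * dy from by ring,
      pv_loop1_eq x1 y1 dx dy g hd hg fuel1 1 PySem.Set.empty (le_refl 1) hg (by omega),
      pv_foldl_add_disj pt (PySem.List.pyRange 1 g 1) PySem.Set.empty hnodupI (by intro x _; simp [PySem.Set.empty])]
  simp only [PySem.Set.empty]
  rw [List.nil_append]
  -- step 2: backward march (direction -1), as a march with step (-1)*dx, (-1)*dy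
  have hib' : ∀ k : Int, (0 ≤ x1 + k * ((-1) * dx) ∧ x1 + k * ((-1) * dx) < w ∧
      0 ≤ y1 + k * ((-1) * dy) ∧ y1 + k * ((-1) * dy) < h) ↔ (-hi ≤ k ∧ k ≤ -lo) := by
    intro k
    have h2 := hib (-k)
    rw [show x1 + -k * dx = x1 + k * ((-1) * dx) from by ring,
        show y1 + -k * dy = y1 + k * ((-1) * dy) from by ring] at h2
    rw [h2]
    omega
  have hre : (PySem.List.pyRange 1 (-lo + 1) 1).map (fun k => (x1 + k * ((-1) * dx), y1 + k * ((-1) * dy))) = B0 := by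
    rw [hB0, hptdef, PySem.List.pyRange_one, PySem.List.pyRange_neg_one, List.map_map, List.map_map]
    rw [show (-1 - (lo - 1)).toNat = (-lo + 1 - 1).toNat from by omega]
    apply List.map_congr_left
    intro i _
    simp only [Function.comp, Prod.mk.injEq]
    constructor <;> ring
  rw [show x1 + (-1) * dx = x1 + 1 * ((-1) * dx) from by ring,
      show y1 + (-1) * dy = y1 + 1 * ((-1) * dy) from by ring]
  by_cases hb : lo ≤ -1 ∧ -1 ≤ hi
  · rw [pv_march_eq w h ((-1) * dx) ((-1) * dy) x1 y1 (-hi) (-lo) hib'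
          (w.natAbs + h.natAbs + 2) 1 I0 (by have := hlen (by omega); omega) (by omega),
        pv_foldl_add_disj (fun k => (x1 + k * ((-1) * dx), y1 + k * ((-1) * dy)))
          (PySem.List.pyRange 1 (-lo + 1) 1) I0 (by rw [hre]; exact hnodupB) (by rw [hre]; exact hdisjBI),
        hre, if_pos hb]
    -- step 3 with s2 = I0 ++ B0
    rw [show (1 : Int) * dx = dx from one_mul dx, show (1 : Int) * dy = dy from one_mul dy,
        show x1 + dx = x1 + 1 * dx from by ring, show y1 + dy = y1 + 1 * dy from by ring]
    by_cases hf2 : lo ≤ 1 ∧ 1 ≤ hi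
    · rw [pv_march_eq w h dx dy x1 y1 lo hi hib (w.natAbs + h.natAbs + 2) 1 (I0 ++ B0)
            (by have := hlen (by omega); omega) hf2.1]
      by_cases hg2 : g ≤ hi
      · rw [if_pos ⟨hf2.1, hg2⟩,
            PySem.List.pyRange_one_append 1 g (hi + 1) (by omega) (by omega), List.foldl_append,
            pv_foldl_add_sub pt (PySem.List.pyRange 1 g 1) (I0 ++ B0)
              (by intro x hx; exact List.mem_append_left B0 hx),
            pv_foldl_add_disj pt (PySem.List.pyRange g (hi + 1) 1) (I0 ++ B0) hnodupF
              (by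
                intro x hx hx'
                obtain ⟨k, hk, rfl⟩ := by simpa [hF0, List.mem_map, PySem.List.mem_pyRange_one] using hx
                rcases List.mem_append.mp hx' with hxi | hxb
                · obtain ⟨j, hj, hjk⟩ := (hmemI _).mp hxi
                  have := hinj hjk; omega
                · obtain ⟨j, hj, hjk⟩ := (hmemB _).mp hxb
                  have := hinj hjk; omega)]
        rw [PySem.Set.ofList_eq_self_of_nodup _ (by
          rw [List.nodup_append]
          refine ⟨hnodupIB, hnodupF, pv_ne_of_disj ?_⟩
          intro x hx hx'
          obtain ⟨k, hk, rfl⟩ := List.mem_map.mp hx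
          rw [PySem.List.mem_pyRange_one] at hk
          rcases List.mem_append.mp hx' with hxi | hxb
          · obtain ⟨j, hj, hjk⟩ := (hmemI _).mp hxi
            have := hinj hjk; omega
          · obtain ⟨j, hj, hjk⟩ := (hmemB _).mp hxb
            have := hinj hjk; omega)]
      · rw [if_neg (by omega),
            pv_foldl_add_sub pt (PySem.List.pyRange 1 (hi + 1) 1) (I0 ++ B0)
              (by
                intro x hx
                obtain ⟨k, hk, rfl⟩ := by simpa [List.mem_map, PySem.List.mem_pyRange_one] using hx
                exact List.mem_append_left B0 ((hmemI _).mpr ⟨k, ⟨by omega, by omega⟩, rfl⟩)),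
            PySem.Set.ofList_eq_self_of_nodup _ hnodupIB]
    · rw [if_neg (by omega),
          pv_march_stop w h dx dy x1 y1 lo hi hib 1 (by omega) _ (by omega) (I0 ++ B0),
          PySem.Set.ofList_eq_self_of_nodup _ hnodupIB]
  · rw [pv_march_stop w h ((-1) * dx) ((-1) * dy) x1 y1 (-hi) (-lo) hib' 1 (by omega) _ (by omega) I0,
        if_neg hb]
    -- step 3 with s2 = I0
    rw [show (1 : Int) * dx = dx from one_mul dx, show (1 : Int) * dy = dy from one_mul dy,
        show x1 + dx = x1 + 1 * dx from by ring, show y1 + dy = y1 + 1 * dy from by ring]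
    by_cases hf2 : lo ≤ 1 ∧ 1 ≤ hi
    · rw [pv_march_eq w h dx dy x1 y1 lo hi hib (w.natAbs + h.natAbs + 2) 1 I0
            (by have := hlen (by omega); omega) hf2.1]
      by_cases hg2 : g ≤ hi
      · rw [if_pos ⟨hf2.1, hg2⟩,
            PySem.List.pyRange_one_append 1 g (hi + 1) (by omega) (by omega), List.foldl_append,
            pv_foldl_add_sub pt (PySem.List.pyRange 1 g 1) I0 (by intro x hx; exact hx),
            pv_foldl_add_disj pt (PySem.List.pyRange g (hi + 1) 1) I0 hnodupF
              (by
                intro x hx hx'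
                obtain ⟨k, hk, rfl⟩ := by simpa [hF0, List.mem_map, PySem.List.mem_pyRange_one] using hx
                obtain ⟨j, hj, hjk⟩ := (hmemI _).mp hx'
                have := hinj hjk; omega)]
        rw [PySem.Set.ofList_eq_self_of_nodup _ (by
          rw [List.nodup_append]
          refine ⟨hnodupI, hnodupF, pv_ne_of_disj ?_⟩
          intro x hx hx'
          obtain ⟨k, hk, rfl⟩ := List.mem_map.mp hx
          rw [PySem.List.mem_pyRange_one] at hk
          obtain ⟨j, hj, hjk⟩ := (hmemI _).mp hx'
          have := hinj hjk; omega)]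
      · rw [if_neg (by omega),
            pv_foldl_add_sub pt (PySem.List.pyRange 1 (hi + 1) 1) I0
              (by
                intro x hx
                obtain ⟨k, hk, rfl⟩ := by simpa [List.mem_map, PySem.List.mem_pyRange_one] using hx
                exact (hmemI _).mpr ⟨k, ⟨by omega, by omega⟩, rfl⟩),
            PySem.Set.ofList_eq_self_of_nodup _ hnodupI]
    · rw [if_neg (by omega),
          pv_march_stop w h dx dy x1 y1 lo hi hib 1 (by omega) _ (by omega) I0,
          PySem.Set.ofList_eq_self_of_nodup _ hnodupI]

-- ===== VERDICT (by name: the statement is the Claim_ definition above) =====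

theorem calc_py_spec : Claim_equal_calc_py := by
  intro a1 a2 w h _ hpre
  unfold Pre_calc_py at hpre
  unfold Spec_calc_py calc_py calc_py_alt
  obtain ⟨x1, y1⟩ := a1
  obtain ⟨x2, y2⟩ := a2
  dsimp only
  have hne : ¬(x2 - x1 = 0 ∧ y2 - y1 = 0) := by
    rintro ⟨h1, h2⟩
    exact hpre (by rw [show x2 = x1 from by omega, show y2 = y1 from by omega])
  set g0 : Nat := Int.gcd (x2 - x1) (y2 - y1) with hg0def
  have hg0pos : 0 < g0 := Nat.pos_of_ne_zero (fun hz => hne (Int.gcd_eq_zero_iff.mp hz))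
  set g : Int := (g0 : Int) with hgdef
  have hgpos : 0 < g := by rw [hgdef]; exact_mod_cast hg0pos
  set dx := PySem.Int.floordiv (x2 - x1) g with hdxdef
  set dy := PySem.Int.floordiv (y2 - y1) g with hdydef
  have hgdx : g ∣ (x2 - x1) := by rw [hgdef, hg0def]; exact Int.gcd_dvd_left _ _
  have hgdy : g ∣ (y2 - y1) := by rw [hgdef, hg0def]; exact Int.gcd_dvd_right _ _
  have hdx : x2 - x1 = g * dx := by
    rw [hdxdef, PySem.Int.floordiv_eq_ediv_of_pos hgpos]
    exact (Int.mul_ediv_cancel' hgdx).symm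
  have hdy : y2 - y1 = g * dy := by
    rw [hdydef, PySem.Int.floordiv_eq_ediv_of_pos hgpos]
    exact (Int.mul_ediv_cancel' hgdy).symm
  have hd : ¬(dx = 0 ∧ dy = 0) := by
    rintro ⟨h1, h2⟩
    exact hne ⟨by rw [hdx, h1, mul_zero], by rw [hdy, h2, mul_zero]⟩
  have hx2 : x2 = x1 + g * dx := by linarith
  have hy2 : y2 = y1 + g * dy := by linarith
  rw [hx2, hy2]
  set L : Int × Int :=
    (if dx = 0 then (if 0 ≤ x1 ∧ x1 < w then pvAxis y1 dy h else (0, -1))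
     else if dy = 0 then (if 0 ≤ y1 ∧ y1 < h then pvAxis x1 dx w else (0, -1))
     else (max (pvAxis x1 dx w).1 (pvAxis y1 dy h).1, min (pvAxis x1 dx w).2 (pvAxis y1 dy h).2)) with hL
  have hib : ∀ k : Int, (0 ≤ x1 + k * dx ∧ x1 + k * dx < w ∧ 0 ≤ y1 + k * dy ∧ y1 + k * dy < h) ↔ (L.1 ≤ k ∧ k ≤ L.2) := by
    intro k
    by_cases h1 : dx = 0
    · rw [hL, if_pos h1]
      by_cases hx : 0 ≤ x1 ∧ x1 < w
      · rw [if_pos hx]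
        have hdy0 : dy ≠ 0 := fun hy => hd ⟨h1, hy⟩
        have hax := pv_axis_iff y1 dy h k hdy0
        simp only [h1, mul_zero, add_zero]
        constructor
        · rintro ⟨_, _, hy1, hy2⟩
          exact hax.mp ⟨hy1, hy2⟩
        · intro hk
          exact ⟨hx.1, hx.2, (hax.mpr hk).1, (hax.mpr hk).2⟩
      · rw [if_neg hx]
        simp only [h1, mul_zero, add_zero]
        constructor
        · rintro ⟨ha, hb, _, _⟩
          exact absurd ⟨ha, hb⟩ hx
        · intro hk
          have hk' : (0 : Int) ≤ k ∧ k ≤ -1 := hk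
          omega
    · by_cases h2 : dy = 0
      · rw [hL, if_neg h1, if_pos h2]
        by_cases hy : 0 ≤ y1 ∧ y1 < h
        · rw [if_pos hy]
          have hax := pv_axis_iff x1 dx w k h1
          simp only [h2, mul_zero, add_zero]
          constructor
          · rintro ⟨hx1, hx2, _, _⟩
            exact hax.mp ⟨hx1, hx2⟩
          · intro hk
            exact ⟨(hax.mpr hk).1, (hax.mpr hk).2, hy.1, hy.2⟩
        · rw [if_neg hy]
          simp only [h2, mul_zero, add_zero]
          constructor
          · rintro ⟨_, _, ha, hb⟩
            exact absurd ⟨ha, hb⟩ hy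
          · intro hk
            have hk' : (0 : Int) ≤ k ∧ k ≤ -1 := hk
            omega
      · rw [hL, if_neg h1, if_neg h2]
        have haxx := pv_axis_iff x1 dx w k h1
        have haxy := pv_axis_iff y1 dy h k h2
        constructor
        · rintro ⟨ha, hb, hc, hd2⟩
          have hxk := haxx.mp ⟨ha, hb⟩
          have hyk := haxy.mp ⟨hc, hd2⟩
          exact ⟨max_le hxk.1 hyk.1, le_min hxk.2 hyk.2⟩
        · rintro ⟨ha, hb⟩
          simp only [max_le_iff, le_min_iff] at ha hb
          have h3 := haxx.mpr ⟨ha.1, hb.1⟩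
          have h4 := haxy.mpr ⟨ha.2, hb.2⟩
          exact ⟨h3.1, h3.2, h4.1, h4.2⟩
  exact pv_main_eq x1 y1 dx dy g w h L.1 L.2 g0 (by omega) hd (by omega) hib
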